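-- pv_equiv track=rewrite | github.com/wasimahmedn/DSA_Topics | BoundSearch/minimum_obsolute_sum_difference.py | min_obslt_sum_diff
-- ===== SOURCE A (Python) =====
-- def upper_bound(lst:list[int],x:int)->int:
--     lo,up=0,len(lst)-1
--     while lo<up:
--         mid=(lo+up)//2
--         if x<lst[mid]:
--             up=mid
--         else:
--             lo=mid+1
--     return lo
--
-- def min_obslt_sum_diff(nums1,nums2,n):
--     obslt_diff=[]
--     for i in range(n):
--         obslt_diff.append(abs(nums1[i]-nums2[i]))
--
--     nums1.sort()
--     best_diff=[]
--     for i in range(n):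
--         pos=upper_bound(nums1,nums2[i])
--         if pos>0 and pos<n:
--             best_diff.append(min(abs(nums1[pos]-nums2[i]),abs(nums1[pos-1]-nums2[i])))
--         elif pos==0:
--             best_diff.append(abs(nums1[0]-nums2[i]))
--         elif pos>=n:
--             best_diff.append(abs(nums1[n-1]-nums2[i]))
--
--     mx=0
--     for i in range(n):
--         mx=max(mx,abs(obslt_diff[i]-best_diff[i]))
--     return abs(sum(obslt_diff)-mx)%(pow(10,9)+7)
-- ===== SOURCE B (Python) =====
-- def min_obslt_sum_diff(nums1, nums2, n):
--     obslt_diff = [abs(nums1[i] - nums2[i]) for i in range(n)]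
--     nums1.sort()
--     prefix = nums1[:n]
--     order = sorted(range(n), key=lambda i: nums2[i])
--     best = [0] * n
--     j = 0
--     for i in order:
--         q = nums2[i]
--         while j + 1 < len(prefix) and abs(prefix[j + 1] - q) <= abs(prefix[j] - q):
--             j += 1
--         best[i] = abs(prefix[j] - q)
--     mx = 0
--     for i in range(n):
--         mx = max(mx, abs(obslt_diff[i] - best[i]))
--     return abs(sum(obslt_diff) - mx) % (10 ** 9 + 7)
-- ===== Notes on version B (the rewrite author's own statement) =====
-- stated objective: alternative
-- what changed: Replaced A's hand-written clamped binary search per query (and its separate best_diff list pass) by sorting the query indices of nums2 once and doing a single monotone two-pointer sweep over the sorted prefix of nums1 that fills best[i] with the nearest-element distance.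
import Mathlib
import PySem

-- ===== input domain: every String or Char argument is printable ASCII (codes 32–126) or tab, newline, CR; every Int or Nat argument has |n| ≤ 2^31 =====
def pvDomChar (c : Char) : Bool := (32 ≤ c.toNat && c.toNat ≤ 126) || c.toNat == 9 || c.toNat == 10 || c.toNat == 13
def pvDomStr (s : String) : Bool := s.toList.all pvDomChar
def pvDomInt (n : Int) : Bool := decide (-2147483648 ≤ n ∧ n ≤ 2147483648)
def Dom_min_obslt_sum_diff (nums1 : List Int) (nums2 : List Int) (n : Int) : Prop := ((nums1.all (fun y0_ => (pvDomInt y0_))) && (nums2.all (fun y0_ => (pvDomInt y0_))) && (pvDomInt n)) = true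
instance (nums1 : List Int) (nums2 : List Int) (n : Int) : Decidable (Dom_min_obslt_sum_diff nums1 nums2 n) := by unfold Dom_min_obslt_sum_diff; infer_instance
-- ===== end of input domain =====

-- B replaces A's per-query clamped binary search by sorting the query indices once and doing a single
-- monotone two-pointer sweep over the sorted prefix (a different algorithm of the same asymptotic cost).
-- Both A and B sort nums1 IN PLACE; the equivalence proved is about the return value (B performs the
-- same mutation of nums1).

-- ===== PORT A =====
-- A's upper_bound loop; the fuel only bounds the number of iterations (the interval
-- shrinks by at least one each round, so fuel = interval width is always enough)
def pvUbGo (lst : List Int) (x : Int) : Nat → Int → Int → Int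
  | 0, lo, _ => lo
  | fuel + 1, lo, up =>
    if lo < up then
      let mid := PySem.Int.floordiv (lo + up) 2
      if x < PySem.List.pyGetD lst mid 0 then
        pvUbGo lst x fuel lo mid
      else
        pvUbGo lst x fuel (mid + 1) up
    else lo

def pvUpperBound (lst : List Int) (x : Int) : Int :=
  pvUbGo lst x lst.length 0 ((lst.length : Int) - 1)

def min_obslt_sum_diff (nums1 : List Int) (nums2 : List Int) (n : Int) : Int :=
  let obslt := (PySem.List.pyRange 0 n 1).foldl
    (fun acc i => acc ++ [|PySem.List.pyGetD nums1 i 0 - PySem.List.pyGetD nums2 i 0|]) []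
  let s1 := PySem.List.sorted nums1 (fun y => y) false
  let best := (PySem.List.pyRange 0 n 1).foldl
    (fun acc i =>
      let q := PySem.List.pyGetD nums2 i 0
      let pos := pvUpperBound s1 q
      if 0 < pos ∧ pos < n then
        acc ++ [min |PySem.List.pyGetD s1 pos 0 - q| |PySem.List.pyGetD s1 (pos - 1) 0 - q|]
      else if pos = 0 then
        acc ++ [|PySem.List.pyGetD s1 0 0 - q|]
      else if n ≤ pos then
        acc ++ [|PySem.List.pyGetD s1 (n - 1) 0 - q|]
      else acc) []
  let mx := (PySem.List.pyRange 0 n 1).foldl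
    (fun mx i => max mx |PySem.List.pyGetD obslt i 0 - PySem.List.pyGetD best i 0|) 0
  PySem.Int.mod |obslt.sum - mx| (10 ^ 9 + 7)

-- ===== PORT B =====
-- B's inner while loop: advance while the next prefix element is no farther from q.
-- The fuel only bounds the iteration count (j increases and stays below len(prefix),
-- so fuel = len(prefix) is always enough).
def pvSweepWhile (pre : List Int) (q : Int) : Nat → Int → Int
  | 0, j => j
  | fuel + 1, j =>
    if j + 1 < (pre.length : Int) ∧
        |PySem.List.pyGetD pre (j + 1) 0 - q| ≤ |PySem.List.pyGetD pre j 0 - q| then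
      pvSweepWhile pre q fuel (j + 1)
    else j

def min_obslt_sum_diff_alt (nums1 : List Int) (nums2 : List Int) (n : Int) : Int :=
  let obslt := (PySem.List.pyRange 0 n 1).map
    (fun i => |PySem.List.pyGetD nums1 i 0 - PySem.List.pyGetD nums2 i 0|)
  let s1 := PySem.List.sorted nums1 (fun y => y) false
  let pre := PySem.List.slice s1 none (some n)
  let order := PySem.List.sorted (PySem.List.pyRange 0 n 1) (fun i => PySem.List.pyGetD nums2 i 0) false
  let st := order.foldl
    (fun (st : Int × List Int) i =>
      let q := PySem.List.pyGetD nums2 i 0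
      let j := pvSweepWhile pre q pre.length st.1
      (j, PySem.List.pySetD st.2 i |PySem.List.pyGetD pre j 0 - q|))
    (0, List.replicate n.toNat 0)
  let best := st.2
  let mx := (PySem.List.pyRange 0 n 1).foldl
    (fun mx i => max mx |PySem.List.pyGetD obslt i 0 - PySem.List.pyGetD best i 0|) 0
  PySem.Int.mod |obslt.sum - mx| (10 ^ 9 + 7)

-- ===== PRECONDITION & SPEC =====
-- Pre_ is exactly where A returns: A indexes nums1[i] and nums2[i] for 0 ≤ i < n (IndexError beyond).
def Pre_min_obslt_sum_diff (nums1 : List Int) (nums2 : List Int) (n : Int) : Prop :=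
  n ≤ (nums1.length : Int) ∧ n ≤ (nums2.length : Int)
instance (nums1 : List Int) (nums2 : List Int) (n : Int) : Decidable (Pre_min_obslt_sum_diff nums1 nums2 n) := by unfold Pre_min_obslt_sum_diff; infer_instance
def pvWitness_min_obslt_sum_diff : List Int × List Int × Int := ([1, 7, 5], [2, 3, 10], 3)

def Spec_min_obslt_sum_diff (nums1 : List Int) (nums2 : List Int) (n : Int) (out : Int) : Prop := out = min_obslt_sum_diff_alt nums1 nums2 n
instance (nums1 : List Int) (nums2 : List Int) (n : Int) (out : Int) : Decidable (Spec_min_obslt_sum_diff nums1 nums2 n out) := by unfold Spec_min_obslt_sum_diff; infer_instance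

-- ===== CLAIM (what is proved, stated in full; the proofs are below) =====
def Claim_equal_min_obslt_sum_diff : Prop := ∀ (nums1 : List Int) (nums2 : List Int) (n : Int), Dom_min_obslt_sum_diff nums1 nums2 n → Pre_min_obslt_sum_diff nums1 nums2 n → Spec_min_obslt_sum_diff nums1 nums2 n (min_obslt_sum_diff nums1 nums2 n)

-- ===== LEMMAS AND PROOFS =====

-- pyGetD at a nonnegative Int index is getD at the Nat index
lemma pv_pyGetD_toNat (xs : List Int) (i : Int) (d : Int) (h : 0 ≤ i) :
    PySem.List.pyGetD xs i d = xs.getD i.toNat d := by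
  obtain ⟨k, rfl⟩ : ∃ k : Nat, i = (k : Int) := ⟨i.toNat, by omega⟩
  rw [PySem.List.pyGetD_natCast]
  simp

-- index form of sortedness
lemma pv_sorted_getD (l : List Int) (hs : l.Pairwise (· ≤ ·)) :
    ∀ j k : Nat, j ≤ k → k < l.length → l.getD j 0 ≤ l.getD k 0 := by
  intro j k hjk hk
  rcases Nat.eq_or_lt_of_le hjk with h | h
  · subst h; exact le_refl _
  · have hj : j < l.length := lt_trans h hk
    rw [List.getD_eq_getElem l 0 hj, List.getD_eq_getElem l 0 hk]
    exact List.pairwise_iff_getElem.mp hs j k hj hk h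

-- loop invariant of A's binary search
lemma pvUbGo_spec (l : List Int) (x : Int)
    (hs : ∀ j k : Nat, j ≤ k → k < l.length → l.getD j 0 ≤ l.getD k 0) :
    ∀ fuel : Nat, ∀ lo up : Int, (up - lo).toNat ≤ fuel →
    0 ≤ lo → lo ≤ up → up ≤ (l.length : Int) - 1 →
    (∀ k : Int, 0 ≤ k → k < lo → l.getD k.toNat 0 ≤ x) →
    (∀ k : Int, up ≤ k → k < (l.length : Int) - 1 → x < l.getD k.toNat 0) →
    lo ≤ pvUbGo l x fuel lo up ∧ pvUbGo l x fuel lo up ≤ up ∧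
    (∀ k : Int, 0 ≤ k → k < pvUbGo l x fuel lo up → l.getD k.toNat 0 ≤ x) ∧
    (∀ k : Int, pvUbGo l x fuel lo up ≤ k → k < (l.length : Int) - 1 → x < l.getD k.toNat 0) := by
  intro fuel
  induction fuel with
  | zero =>
    intro lo up hf h0 hle hup Hlo Hup
    simp only [pvUbGo]
    exact ⟨le_refl _, hle, Hlo, fun k hk hk2 => Hup k (by omega) hk2⟩
  | succ f ih =>
    intro lo up hf h0 hle hup Hlo Hup
    simp only [pvUbGo]
    by_cases h : lo < up
    · simp only [h, if_true]
      have hm1 : PySem.Int.floordiv (lo + up) 2 < up :=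
        (PySem.Int.floordiv_lt_iff_lt_mul (by omega : (0:Int) < 2)).mpr (by omega)
      have hm2 : lo ≤ PySem.Int.floordiv (lo + up) 2 :=
        (PySem.Int.le_floordiv_iff_mul_le (by omega : (0:Int) < 2)).mpr (by omega)
      set mid := PySem.Int.floordiv (lo + up) 2 with hmid
      have hmidN : PySem.List.pyGetD l mid 0 = l.getD mid.toNat 0 :=
        pv_pyGetD_toNat l mid 0 (by omega)
      by_cases hx : x < PySem.List.pyGetD l mid 0
      · simp only [hx, if_true]
        have Hup' : ∀ k : Int, mid ≤ k → k < (l.length : Int) - 1 → x < l.getD k.toNat 0 := by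
          intro k hk hk2
          have hkN : mid.toNat ≤ k.toNat := by omega
          have := hs mid.toNat k.toNat hkN (by omega)
          rw [hmidN] at hx
          omega
        obtain ⟨a1, a2, a3, a4⟩ := ih lo mid (by omega) h0 hm2 (by omega) Hlo Hup'
        exact ⟨a1, by omega, a3, a4⟩
      · simp only [hx, if_false]
        have Hlo' : ∀ k : Int, 0 ≤ k → k < mid + 1 → l.getD k.toNat 0 ≤ x := by
          intro k hk hkl
          by_cases hkl2 : k < lo
          · exact Hlo k hk hkl2
          · have hkN : k.toNat ≤ mid.toNat := by omega
            have := hs k.toNat mid.toNat hkN (by omega)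
            rw [hmidN] at hx
            omega
        obtain ⟨a1, a2, a3, a4⟩ := ih (mid + 1) up (by omega) (by omega) (by omega) hup Hlo' Hup
        exact ⟨by omega, a2, a3, a4⟩
    · simp only [h, if_false]
      exact ⟨le_refl _, hle, Hlo, fun k hk hk2 => Hup k (by omega) hk2⟩

-- characterization of A's upper_bound on the whole list
lemma pvUpperBound_spec (l : List Int) (x : Int) (hne : 1 ≤ l.length)
    (hs : ∀ j k : Nat, j ≤ k → k < l.length → l.getD j 0 ≤ l.getD k 0) :
    0 ≤ pvUpperBound l x ∧ pvUpperBound l x ≤ (l.length : Int) - 1 ∧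
    (∀ k : Int, 0 ≤ k → k < pvUpperBound l x → l.getD k.toNat 0 ≤ x) ∧
    (∀ k : Int, pvUpperBound l x ≤ k → k < (l.length : Int) - 1 → x < l.getD k.toNat 0) := by
  have h := pvUbGo_spec l x hs l.length 0 ((l.length : Int) - 1)
    (by omega) (le_refl _) (by omega) (le_refl _)
    (fun k hk hk2 => absurd hk (by omega)) (fun k hk hk2 => absurd hk2 (by omega))
  exact ⟨h.1, h.2.1, h.2.2.1, h.2.2.2⟩

-- A's per-query branch value, as a function of the query
def pvG (l : List Int) (n : Int) (q : Int) : Int :=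
  if 0 < pvUpperBound l q ∧ pvUpperBound l q < n then
    min |PySem.List.pyGetD l (pvUpperBound l q) 0 - q| |PySem.List.pyGetD l (pvUpperBound l q - 1) 0 - q|
  else if pvUpperBound l q = 0 then |PySem.List.pyGetD l 0 0 - q|
  else if n ≤ pvUpperBound l q then |PySem.List.pyGetD l (n - 1) 0 - q|
  else 0

-- A's per-query branch value equals B's min distance over the sorted prefix
lemma pv_best_eq (l : List Int) (n : Int) (q : Int)
    (hS : l.Pairwise (· ≤ ·)) (h1 : 1 ≤ n) (hL : n ≤ (l.length : Int)) :
    pvG l n q =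
    (PySem.List.min? ((l.take n.toNat).map (fun x => |x - q|)) (fun y => y)).getD 0 := by
  have hs := pv_sorted_getD l hS
  have hL1 : 1 ≤ l.length := by omega
  obtain ⟨hr0, hr1, Hlt, Hgt⟩ := pvUpperBound_spec l q hL1 hs
  set r := pvUpperBound l q with hrdef
  set P := (l.take n.toNat).map (fun x => |x - q|) with hP
  have hlen : (l.take n.toNat).length = n.toNat := by
    rw [List.length_take]; omega
  have hPmem : ∀ y ∈ P, ∃ j : Nat, j < n.toNat ∧ y = |l.getD j 0 - q| := by
    intro y hy
    rw [hP, List.mem_map] at hy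
    obtain ⟨x, hx, rfl⟩ := hy
    obtain ⟨j, hj, rfl⟩ := List.mem_iff_getElem.mp hx
    refine ⟨j, by omega, ?_⟩
    rw [List.getElem_take, List.getD_eq_getElem l 0 (by omega)]
  have hmemP : ∀ j : Nat, j < n.toNat → |l.getD j 0 - q| ∈ P := by
    intro j hj
    rw [hP, List.mem_map]
    refine ⟨(l.take n.toNat)[j]'(by omega), List.getElem_mem _, ?_⟩
    rw [List.getElem_take, List.getD_eq_getElem l 0 (by omega)]
  obtain ⟨m, hm⟩ : ∃ m, PySem.List.min? P (fun y => y) = some m := by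
    cases hmin : PySem.List.min? P (fun y => y) with
    | none =>
      exfalso
      have hnil := (PySem.List.min?_eq_none_iff P (fun y => y)).mp hmin
      have : P.length = n.toNat := by rw [hP, List.length_map, hlen]
      rw [hnil] at this
      simp at this
      omega
    | some m => exact ⟨m, rfl⟩
  have hmmem := PySem.List.min?_mem hm
  have hmin : ∀ y ∈ P, m ≤ y := PySem.List.min?_isMin hm
  rw [hm, Option.getD_some]
  unfold pvG
  rw [← hrdef]
  by_cases hc1 : 0 < r ∧ r < n
  · rw [if_pos hc1]
    rw [pv_pyGetD_toNat l r 0 (by omega), pv_pyGetD_toNat l (r - 1) 0 (by omega)]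
    have hq1 : l.getD (r - 1).toNat 0 ≤ q := Hlt (r - 1) (by omega) (by omega)
    apply le_antisymm
    · obtain ⟨j, hj, hmj⟩ := hPmem m hmmem
      rw [hmj]
      by_cases hjr : (j : Int) < r
      · have h1' : l.getD j 0 ≤ l.getD (r - 1).toNat 0 := hs j (r - 1).toNat (by omega) (by omega)
        have h2' : |l.getD (r - 1).toNat 0 - q| ≤ |l.getD j 0 - q| := by
          rw [abs_of_nonpos (by omega), abs_of_nonpos (by omega)]; omega
        exact le_trans (min_le_right _ _) h2'
      · by_cases hjr2 : (j : Int) = r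
        · have : j = r.toNat := by omega
          rw [this]
          exact min_le_left _ _
        · have hrL : r < (l.length : Int) - 1 := by omega
          have hq2 : q < l.getD r.toNat 0 := Hgt r (le_refl r) hrL
          have h1' : l.getD r.toNat 0 ≤ l.getD j 0 := hs r.toNat j (by omega) (by omega)
          have h2' : |l.getD r.toNat 0 - q| ≤ |l.getD j 0 - q| := by
            rw [abs_of_nonneg (by omega), abs_of_nonneg (by omega)]; omega
          exact le_trans (min_le_left _ _) h2'
    · exact le_min (hmin _ (hmemP r.toNat (by omega))) (hmin _ (hmemP (r - 1).toNat (by omega)))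
  · rw [if_neg hc1]
    by_cases hc2 : r = 0
    · rw [if_pos hc2]
      rw [pv_pyGetD_toNat l 0 0 (le_refl 0)]
      rw [Int.toNat_zero]
      apply le_antisymm
      · obtain ⟨j, hj, hmj⟩ := hPmem m hmmem
        rw [hmj]
        by_cases hj0 : j = 0
        · rw [hj0]
        · have hq0 : q < l.getD (0 : Int).toNat 0 := Hgt 0 (by omega) (by omega)
          rw [Int.toNat_zero] at hq0
          have h1' : l.getD 0 0 ≤ l.getD j 0 := hs 0 j (by omega) (by omega)
          rw [abs_of_nonneg (by omega), abs_of_nonneg (by omega)]; omega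
      · exact hmin _ (hmemP 0 (by omega))
    · rw [if_neg hc2]
      have hc3 : n ≤ r := by omega
      rw [if_pos hc3]
      rw [pv_pyGetD_toNat l (n - 1) 0 (by omega)]
      have hq : l.getD (n - 1).toNat 0 ≤ q := Hlt (n - 1) (by omega) (by omega)
      apply le_antisymm
      · obtain ⟨j, hj, hmj⟩ := hPmem m hmmem
        rw [hmj]
        have h1' : l.getD j 0 ≤ l.getD (n - 1).toNat 0 := hs j (n - 1).toNat (by omega) (by omega)
        rw [abs_of_nonpos (by omega), abs_of_nonpos (by omega)]; omega
      · exact hmin _ (hmemP (n - 1).toNat (by omega))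

-- reading a pySetD-updated list at a nonnegative index
lemma pv_get_set (xs : List Int) (i m : Int) (v d : Int)
    (h0 : 0 ≤ i) (h1 : i < (xs.length : Int)) (hm : 0 ≤ m) :
    PySem.List.pyGetD (PySem.List.pySetD xs i v) m d =
      if m = i then v else PySem.List.pyGetD xs m d := by
  obtain ⟨ni, rfl⟩ : ∃ k : Nat, i = (k : Int) := ⟨i.toNat, by omega⟩
  obtain ⟨nm, rfl⟩ : ∃ k : Nat, m = (k : Int) := ⟨m.toNat, by omega⟩
  rw [PySem.List.pyGetD_pySetD_natCast xs ni nm v d (by omega)]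
  by_cases h : nm = ni
  · simp [h]
  · rw [if_neg h, if_neg (by exact_mod_cast h)]

-- sortedness of the prefix, in index form
lemma pv_sorted_getD_take (l : List Int) (hS : l.Pairwise (· ≤ ·)) (t : Nat) :
    ∀ j k : Nat, j ≤ k → k < (l.take t).length → (l.take t).getD j 0 ≤ (l.take t).getD k 0 := by
  intro j k hjk hk
  have hj : j < (l.take t).length := by omega
  have hmin : (l.take t).length = min t l.length := List.length_take
  have hkl : k < l.length := by omega
  rw [List.getD_eq_getElem _ 0 hj, List.getD_eq_getElem _ 0 hk,
    List.getElem_take, List.getElem_take,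
    ← List.getD_eq_getElem l 0 (by omega : j < l.length), ← List.getD_eq_getElem l 0 hkl]
  exact pv_sorted_getD l hS j k hjk hkl

-- the prefix-min property transfers to a larger query
lemma pv_good_mono (pre : List Int)
    (hs : ∀ j k : Nat, j ≤ k → k < pre.length → pre.getD j 0 ≤ pre.getD k 0)
    (q q' : Int) (hq : q ≤ q') (j : Nat) (hj : j < pre.length)
    (h : ∀ k : Nat, k < j → |pre.getD j 0 - q| ≤ |pre.getD k 0 - q|) :
    ∀ k : Nat, k < j → |pre.getD j 0 - q'| ≤ |pre.getD k 0 - q'| := by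
  intro k hk
  have hab : pre.getD k 0 ≤ pre.getD j 0 := hs k j (le_of_lt hk) hj
  have h1 := h k hk
  rcases abs_cases (pre.getD j 0 - q') with ⟨e1, _⟩ | ⟨e1, _⟩ <;>
    rcases abs_cases (pre.getD k 0 - q') with ⟨e2, _⟩ | ⟨e2, _⟩ <;>
    rcases abs_cases (pre.getD j 0 - q) with ⟨e3, _⟩ | ⟨e3, _⟩ <;>
    rcases abs_cases (pre.getD k 0 - q) with ⟨e4, _⟩ | ⟨e4, _⟩ <;>
    rw [e1, e2] <;> rw [e3, e4] at h1 <;> omega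

-- B's while loop lands on a global nearest prefix element
lemma pv_sweep_while_spec (pre : List Int)
    (hs : ∀ j k : Nat, j ≤ k → k < pre.length → pre.getD j 0 ≤ pre.getD k 0) (q : Int) :
    ∀ fuel : Nat, ∀ j : Int, 0 ≤ j → j < (pre.length : Int) →
    ((pre.length : Int) - 1 - j).toNat ≤ fuel →
    (∀ k : Nat, k < j.toNat → |pre.getD j.toNat 0 - q| ≤ |pre.getD k 0 - q|) →
    j ≤ pvSweepWhile pre q fuel j ∧ 0 ≤ pvSweepWhile pre q fuel j ∧
    pvSweepWhile pre q fuel j < (pre.length : Int) ∧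
    (∀ k : Nat, k < pre.length →
      |pre.getD (pvSweepWhile pre q fuel j).toNat 0 - q| ≤ |pre.getD k 0 - q|) := by
  intro fuel
  induction fuel with
  | zero =>
    intro j h0 hlt hf hgood
    simp only [pvSweepWhile]
    refine ⟨le_refl _, h0, hlt, ?_⟩
    intro k hk
    by_cases hkj : k < j.toNat
    · exact hgood k hkj
    · have : k = j.toNat := by omega
      rw [this]
  | succ f ih =>
    intro j h0 hlt hf hgood
    simp only [pvSweepWhile]
    by_cases hc : j + 1 < (pre.length : Int) ∧
        |PySem.List.pyGetD pre (j + 1) 0 - q| ≤ |PySem.List.pyGetD pre j 0 - q|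
    · rw [if_pos hc]
      obtain ⟨hc1, hc2⟩ := hc
      rw [pv_pyGetD_toNat pre (j + 1) 0 (by omega), pv_pyGetD_toNat pre j 0 h0] at hc2
      have hgood' : ∀ k : Nat, k < (j + 1).toNat →
          |pre.getD (j + 1).toNat 0 - q| ≤ |pre.getD k 0 - q| := by
        intro k hk
        by_cases hkj : k < j.toNat
        · exact le_trans hc2 (hgood k hkj)
        · have : k = j.toNat := by omega
          rw [this]
          exact hc2
      obtain ⟨a1, a2, a3, a4⟩ := ih (j + 1) (by omega) hc1 (by omega) hgood'
      exact ⟨by omega, a2, a3, a4⟩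
    · rw [if_neg hc]
      refine ⟨le_refl _, h0, hlt, ?_⟩
      by_cases hc1 : j + 1 < (pre.length : Int)
      · -- the distance test failed: everything to the right is farther
        have hc2 : |pre.getD j.toNat 0 - q| < |pre.getD (j + 1).toNat 0 - q| := by
          have hlt2 := not_le.mp (fun hb => hc ⟨hc1, hb⟩)
          rwa [pv_pyGetD_toNat pre (j + 1) 0 (by omega), pv_pyGetD_toNat pre j 0 h0] at hlt2
        have hqlt : q < pre.getD (j + 1).toNat 0 := by
          by_contra hcon
          have hcon' : pre.getD (j + 1).toNat 0 ≤ q := by omega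
          have hmono : pre.getD j.toNat 0 ≤ pre.getD (j + 1).toNat 0 :=
            hs j.toNat (j + 1).toNat (by omega) (by omega)
          rw [abs_of_nonpos (by omega), abs_of_nonpos (by omega)] at hc2
          omega
        have hd1 : |pre.getD (j + 1).toNat 0 - q| = pre.getD (j + 1).toNat 0 - q :=
          abs_of_nonneg (by omega)
        rw [hd1] at hc2
        intro k hk
        by_cases hkj : k < j.toNat
        · exact hgood k hkj
        · by_cases hkj2 : k = j.toNat
          · rw [hkj2]
          · have hk1 : (j + 1).toNat ≤ k := by omega
            have hmono : pre.getD (j + 1).toNat 0 ≤ pre.getD k 0 :=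
              hs (j + 1).toNat k hk1 hk
            rw [abs_of_nonneg (by omega : (0 : Int) ≤ pre.getD k 0 - q)]
            omega
      · -- j is the last index
        intro k hk
        by_cases hkj : k < j.toNat
        · exact hgood k hkj
        · have : k = j.toNat := by omega
          rw [this]

-- the min over the mapped distance list, characterized by a global nearest index
lemma pv_minD_eq (pre : List Int) (q : Int) (j : Nat) (hj : j < pre.length)
    (hmin : ∀ k : Nat, k < pre.length → |pre.getD j 0 - q| ≤ |pre.getD k 0 - q|) :
    (PySem.List.min? (pre.map (fun x => |x - q|)) (fun y => y)).getD 0 = |pre.getD j 0 - q| := by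
  obtain ⟨m, hm⟩ : ∃ m, PySem.List.min? (pre.map (fun x => |x - q|)) (fun y => y) = some m := by
    cases hmin' : PySem.List.min? (pre.map (fun x => |x - q|)) (fun y => y) with
    | none =>
      exfalso
      have hnil := (PySem.List.min?_eq_none_iff _ (fun y => y)).mp hmin'
      have : (pre.map (fun x => |x - q|)).length = pre.length := List.length_map ..
      rw [hnil] at this
      simp at this
      omega
    | some m => exact ⟨m, rfl⟩
  have hmmem := PySem.List.min?_mem hm
  have hminle : ∀ y ∈ pre.map (fun x => |x - q|), m ≤ y := PySem.List.min?_isMin hm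
  rw [hm, Option.getD_some]
  apply le_antisymm
  · refine hminle _ (List.mem_map.mpr ⟨pre[j]'hj, List.getElem_mem _, ?_⟩)
    rw [List.getD_eq_getElem pre 0 hj]
  · obtain ⟨x, hx, rfl⟩ := List.mem_map.mp hmmem
    obtain ⟨k, hk, rfl⟩ := List.mem_iff_getElem.mp hx
    have := hmin k hk
    rw [List.getD_eq_getElem pre 0 hk] at this
    exact this

-- the sweep fold fills best[i] with the min distance, for every processed index
lemma pv_fold (pre : List Int) (nums2 : List Int)
    (hs : ∀ j k : Nat, j ≤ k → k < pre.length → pre.getD j 0 ≤ pre.getD k 0)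
    (hlen1 : 1 ≤ pre.length) :
    ∀ (os : List Int) (j : Int) (best : List Int),
    0 ≤ j → j < (pre.length : Int) →
    (∀ i ∈ os, 0 ≤ i ∧ i < (best.length : Int)) →
    List.Pairwise (fun a b => PySem.List.pyGetD nums2 a 0 ≤ PySem.List.pyGetD nums2 b 0) os →
    (∀ i ∈ os, ∀ k : Nat, k < j.toNat →
      |pre.getD j.toNat 0 - PySem.List.pyGetD nums2 i 0| ≤ |pre.getD k 0 - PySem.List.pyGetD nums2 i 0|) →
    (∀ ii : Int, ii ∈ os →
      PySem.List.pyGetD (os.foldl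
        (fun (st : Int × List Int) i =>
          (pvSweepWhile pre (PySem.List.pyGetD nums2 i 0) pre.length st.1,
           PySem.List.pySetD st.2 i
             |PySem.List.pyGetD pre (pvSweepWhile pre (PySem.List.pyGetD nums2 i 0) pre.length st.1) 0 -
               PySem.List.pyGetD nums2 i 0|)) (j, best)).2 ii 0 =
        (PySem.List.min? (pre.map (fun x => |x - PySem.List.pyGetD nums2 ii 0|)) (fun y => y)).getD 0) ∧
    (∀ ii : Int, 0 ≤ ii → ii ∉ os →
      PySem.List.pyGetD (os.foldl
        (fun (st : Int × List Int) i =>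
          (pvSweepWhile pre (PySem.List.pyGetD nums2 i 0) pre.length st.1,
           PySem.List.pySetD st.2 i
             |PySem.List.pyGetD pre (pvSweepWhile pre (PySem.List.pyGetD nums2 i 0) pre.length st.1) 0 -
               PySem.List.pyGetD nums2 i 0|)) (j, best)).2 ii 0 = PySem.List.pyGetD best ii 0) := by
  intro os
  induction os with
  | nil =>
    intro j best h0 hlt hmem hpw hgood
    exact ⟨fun ii hii => (List.not_mem_nil hii).elim, fun ii _ _ => rfl⟩
  | cons i rest ih =>
    intro j best h0 hlt hmem hpw hgood
    simp only [List.foldl_cons]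
    obtain ⟨hw1, hw2, hw3, hw4⟩ := pv_sweep_while_spec pre hs (PySem.List.pyGetD nums2 i 0)
      pre.length j h0 hlt (by omega) (hgood i (List.mem_cons_self ..))
    obtain ⟨hi0, hi1⟩ := hmem i (List.mem_cons_self ..)
    have hpw' := List.pairwise_cons.mp hpw
    have hgood' : ∀ i2 ∈ rest, ∀ k : Nat,
        k < (pvSweepWhile pre (PySem.List.pyGetD nums2 i 0) pre.length j).toNat →
        |pre.getD (pvSweepWhile pre (PySem.List.pyGetD nums2 i 0) pre.length j).toNat 0 -
            PySem.List.pyGetD nums2 i2 0| ≤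
          |pre.getD k 0 - PySem.List.pyGetD nums2 i2 0| := by
      intro i2 hi2
      exact pv_good_mono pre hs (PySem.List.pyGetD nums2 i 0) (PySem.List.pyGetD nums2 i2 0)
        (hpw'.1 i2 hi2) _ (by omega) (fun k hk => hw4 k (by omega))
    have hmem' : ∀ i2 ∈ rest, 0 ≤ i2 ∧ i2 <
        ((PySem.List.pySetD best i
          |PySem.List.pyGetD pre (pvSweepWhile pre (PySem.List.pyGetD nums2 i 0) pre.length j) 0 -
            PySem.List.pyGetD nums2 i 0|).length : Int) := by
      intro i2 hi2
      have := hmem i2 (List.mem_cons_of_mem _ hi2)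
      rwa [PySem.List.length_pySetD]
    obtain ⟨IH1, IH2⟩ := ih (pvSweepWhile pre (PySem.List.pyGetD nums2 i 0) pre.length j)
      (PySem.List.pySetD best i
        |PySem.List.pyGetD pre (pvSweepWhile pre (PySem.List.pyGetD nums2 i 0) pre.length j) 0 -
          PySem.List.pyGetD nums2 i 0|)
      hw2 hw3 hmem' hpw'.2 hgood'
    have hwrite : |PySem.List.pyGetD pre (pvSweepWhile pre (PySem.List.pyGetD nums2 i 0) pre.length j) 0 -
        PySem.List.pyGetD nums2 i 0| =
        (PySem.List.min? (pre.map (fun x => |x - PySem.List.pyGetD nums2 i 0|)) (fun y => y)).getD 0 := by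
      rw [pv_pyGetD_toNat pre _ 0 hw2,
        pv_minD_eq pre (PySem.List.pyGetD nums2 i 0) _ (by omega) hw4]
    constructor
    · intro ii hii
      rcases List.mem_cons.mp hii with rfl | hii2
      · by_cases hin : ii ∈ rest
        · exact IH1 _ hin
        · rw [IH2 ii hi0 hin, pv_get_set best ii ii _ 0 hi0 hi1 hi0, if_pos rfl]
          exact hwrite
      · exact IH1 ii hii2
    · intro ii h0ii hnii
      have hnii2 : ii ∉ rest := fun hr => hnii (List.mem_cons_of_mem _ hr)
      have hne : ii ≠ i := fun he => hnii (he ▸ List.mem_cons_self ..)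
      rw [IH2 ii h0ii hnii2, pv_get_set best i ii _ 0 hi0 hi1 h0ii, if_neg hne]

-- ===== VERDICT (by name: the statement is the Claim_ definition above) =====
theorem min_obslt_sum_diff_spec : Claim_equal_min_obslt_sum_diff := by
  intro nums1 nums2 n _ hpre
  obtain ⟨hp1, hp2⟩ := hpre
  unfold Spec_min_obslt_sum_diff
  by_cases hn : n ≤ 0
  · have hempty : PySem.List.pyRange 0 n 1 = [] := by
      rw [PySem.List.pyRange_one]
      have h0 : (n - 0).toNat = 0 := by omega
      rw [h0]
      rfl
    simp only [min_obslt_sum_diff, min_obslt_sum_diff_alt, hempty, List.foldl_nil, List.map_nil]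
  · replace hn : 0 < n := by omega
    simp only [min_obslt_sum_diff, min_obslt_sum_diff_alt]
    set l := PySem.List.sorted nums1 (fun y => y) false with hl
    have hlen : l.length = nums1.length := (PySem.List.sorted_perm nums1 (fun y => y) false).length_eq
    have hS : l.Pairwise (· ≤ ·) := PySem.List.sorted_pairwise nums1 (fun y => y)
    have hs := pv_sorted_getD l hS
    have hL1 : 1 ≤ l.length := by omega
    rw [PySem.List.foldl_append_singleton_eq_map
      (fun i => |PySem.List.pyGetD nums1 i 0 - PySem.List.pyGetD nums2 i 0|) _ []]
    rw [List.nil_append]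
    have hbest : (PySem.List.pyRange 0 n 1).foldl
        (fun acc i =>
          if 0 < pvUpperBound l (PySem.List.pyGetD nums2 i 0) ∧ pvUpperBound l (PySem.List.pyGetD nums2 i 0) < n then
            acc ++ [min |PySem.List.pyGetD l (pvUpperBound l (PySem.List.pyGetD nums2 i 0)) 0 - PySem.List.pyGetD nums2 i 0|
              |PySem.List.pyGetD l (pvUpperBound l (PySem.List.pyGetD nums2 i 0) - 1) 0 - PySem.List.pyGetD nums2 i 0|]
          else if pvUpperBound l (PySem.List.pyGetD nums2 i 0) = 0 then
            acc ++ [|PySem.List.pyGetD l 0 0 - PySem.List.pyGetD nums2 i 0|]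
          else if n ≤ pvUpperBound l (PySem.List.pyGetD nums2 i 0) then
            acc ++ [|PySem.List.pyGetD l (n - 1) 0 - PySem.List.pyGetD nums2 i 0|]
          else acc) []
        = (PySem.List.pyRange 0 n 1).map (fun i => pvG l n (PySem.List.pyGetD nums2 i 0)) := by
      rw [PySem.List.foldl_congr_mem _ _
        (fun acc i => acc ++ [pvG l n (PySem.List.pyGetD nums2 i 0)]) []
        ?_]
      · exact (PySem.List.foldl_append_singleton_eq_map _ _ []).trans (List.nil_append _)
      · intro acc i hi
        obtain ⟨hr0, hr1, _, _⟩ := pvUpperBound_spec l (PySem.List.pyGetD nums2 i 0) hL1 hs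
        simp only [pvG]
        split_ifs with h1 h2 h3
        · rfl
        · rfl
        · rfl
        · exfalso; omega
    rw [hbest]
    rw [PySem.List.slice_to l (by omega : (0 : Int) ≤ n)]
    have hpre_s := pv_sorted_getD_take l hS n.toNat
    have hprelen : 1 ≤ (l.take n.toNat).length := by
      rw [List.length_take]; omega
    have horder := PySem.List.sorted_pairwise (PySem.List.pyRange 0 n 1)
      (fun i => PySem.List.pyGetD nums2 i 0)
    have hordmem : ∀ i ∈ PySem.List.sorted (PySem.List.pyRange 0 n 1)
        (fun i => PySem.List.pyGetD nums2 i 0) false,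
        0 ≤ i ∧ i < ((List.replicate n.toNat (0 : Int)).length : Int) := by
      intro i hi
      have := PySem.List.mem_pyRange_one.mp ((PySem.List.mem_sorted _ _ _ _).mp hi)
      rw [List.length_replicate]
      omega
    obtain ⟨Hproc, _⟩ := pv_fold (l.take n.toNat) nums2 hpre_s hprelen
      (PySem.List.sorted (PySem.List.pyRange 0 n 1) (fun i => PySem.List.pyGetD nums2 i 0) false)
      0 (List.replicate n.toNat 0) (le_refl 0) (by omega) hordmem horder
      (fun i hi k hk => absurd hk (by omega))
    congr 1
    congr 1
    congr 1
    apply PySem.List.foldl_congr_mem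
    intro acc i hi
    obtain ⟨hi0, hin⟩ := PySem.List.mem_pyRange_one.mp hi
    rw [PySem.List.pyGetD_map_pyRange_of_nonneg
      (fun i => pvG l n (PySem.List.pyGetD nums2 i 0)) n i 0 hi0 hin]
    rw [Hproc i ((PySem.List.mem_sorted _ _ _ _).mpr (PySem.List.mem_pyRange_one.mpr ⟨hi0, hin⟩))]
    rw [pv_best_eq l n (PySem.List.pyGetD nums2 i 0) hS (by omega) (by omega)]
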